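-- pv_equiv track=rewrite | github.com/waabiisaabii/adventOfCode2020 | day_6/solve.py | part_1
-- ===== SOURCE A (Python) =====
-- from typing import List, Dict
--
-- def parse(inputs: List[str]) -> Dict:
--     result = {}
--     raw_idx = 0
--     result_idx = 0
--
--     while raw_idx < len(inputs):
--         if inputs[raw_idx] == '':
--             result_idx = result_idx + 1
--         else:
--             current = result.get(result_idx, ' ')
--             result[result_idx] = current + ' ' + inputs[raw_idx]
--         raw_idx = raw_idx + 1
--     return result
--
-- def part_1(inputs: List[str]) -> int:
--     parsed = parse(inputs)
--     count = 0
--     for _, answers in parsed.items():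
--         yes = set()
--         for c in answers:
--             if c == ' ':
--                 continue
--             else:
--                 yes.add(c)
--         count = count + len(yes)
--     return count
-- ===== SOURCE B (Python) =====
-- def part_1(inputs):
--     total = 0
--     current = set()
--     for line in inputs:
--         if line == '':
--             total += len(current)
--             current = set()
--         else:
--             current.update(c for c in line if c != ' ')
--     return total + len(current)
-- ===== Notes on version B (the rewrite author's own statement) =====
-- stated objective: simpler
-- what changed: Single pass keeping one running set per group and a total, instead of first building a dict of concatenated strings and then re-scanning each concatenation to count distinct characters.
import Mathlib
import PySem

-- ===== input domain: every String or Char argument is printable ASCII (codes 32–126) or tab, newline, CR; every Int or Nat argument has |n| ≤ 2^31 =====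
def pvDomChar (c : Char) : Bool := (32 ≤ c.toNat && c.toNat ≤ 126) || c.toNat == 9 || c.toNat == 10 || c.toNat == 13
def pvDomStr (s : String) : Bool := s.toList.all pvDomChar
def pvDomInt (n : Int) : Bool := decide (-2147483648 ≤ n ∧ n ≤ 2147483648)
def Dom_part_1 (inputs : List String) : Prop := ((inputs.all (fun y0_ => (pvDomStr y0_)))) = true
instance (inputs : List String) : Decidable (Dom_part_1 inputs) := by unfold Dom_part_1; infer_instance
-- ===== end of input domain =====

-- B replaces A's parse-into-a-dict-of-concatenated-strings followed by a recount with a single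
-- pass that keeps one running set per group; both are total and agree on every input.

-- ===== PORT A =====
-- A's parse: the while loop over raw_idx becomes structural recursion consuming the list head;
-- dict values (Python str) are represented as their char lists (exact: '+' on str is ++ on code points).
def parseLoop (inputs : List String) (resultIdx : Int) (result : PySem.Dict Int (List Char)) :
    PySem.Dict Int (List Char) :=
  match inputs with
  | [] => result
  | s :: rest =>
    if s = "" then parseLoop rest (resultIdx + 1) result
    else parseLoop rest resultIdx
      (result.insert resultIdx ((result.getD resultIdx [' ']) ++ ' ' :: s.toList))

def part_1 (inputs : List String) : Int :=
  let parsed := parseLoop inputs 0 PySem.Dict.empty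
  parsed.items.foldl
    (fun count p =>
      count + PySem.Set.len
        (p.2.foldl (fun yes c => if c = ' ' then yes else PySem.Set.add yes c) PySem.Set.empty))
    0

-- ===== PORT B =====
def part_1_alt (inputs : List String) : Int :=
  let st := inputs.foldl
    (fun (st : Int × PySem.Set Char) line =>
      if line = "" then (st.1 + PySem.Set.len st.2, PySem.Set.empty)
      else (st.1, PySem.Set.update st.2 (line.toList.filter (fun c => c != ' '))))
    (0, PySem.Set.empty)
  st.1 + PySem.Set.len st.2

-- ===== PRECONDITION & SPEC =====
def Spec_part_1 (inputs : List String) (out : Int) : Prop := out = part_1_alt inputs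
instance (inputs : List String) (out : Int) : Decidable (Spec_part_1 inputs out) := by unfold Spec_part_1; infer_instance

-- ===== CLAIM (what is proved, stated in full; the proofs are below) =====
def Claim_equal_part_1 : Prop := ∀ (inputs : List String), Dom_part_1 inputs → Spec_part_1 inputs (part_1 inputs)

-- ===== LEMMAS AND PROOFS =====

-- A's inner counting loop over a char list, started from an arbitrary set.
def yesF (cs : List Char) (s : PySem.Set Char) : PySem.Set Char :=
  cs.foldl (fun yes c => if c = ' ' then yes else PySem.Set.add yes c) s

-- distinct-non-space count of one dict value
def fval (cs : List Char) : Int := PySem.Set.len (yesF cs PySem.Set.empty)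

-- A's outer loop as a sum over the items list
def cntItems (l : List (Int × List Char)) : Int := (l.map (fun p => fval p.2)).sum

lemma yesF_append (a b : List Char) (s : PySem.Set Char) :
    yesF (a ++ b) s = yesF b (yesF a s) := by
  simp [yesF, List.foldl_append]

lemma yesF_space_cons (l : List Char) (s : PySem.Set Char) :
    yesF (' ' :: l) s = yesF l s := by
  simp [yesF]

lemma fval_space : fval [' '] = 0 := by decide

lemma map_replace_noop (l : List (Int × List Char)) (k : Int) (v : List Char)
    (h : k ∉ l.map (·.1)) :
    l.map (fun p => if p.1 == k then (k, v) else p) = l := by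
  induction l with
  | nil => rfl
  | cons p t ih =>
    simp only [List.map_cons, List.mem_cons, not_or] at h
    have hb : (p.1 == k) = false := beq_false_of_ne (Ne.symm h.1)
    simp only [List.map_cons, hb, Bool.false_eq_true, if_false, List.cons.injEq]
    exact ⟨trivial, ih h.2⟩

lemma sum_map_replace (l : List (Int × List Char)) (k : Int) (w v : List Char)
    (hn : (l.map (·.1)).Nodup) (hmem : (k, w) ∈ l) :
    cntItems (l.map (fun p => if p.1 == k then (k, v) else p)) =
      cntItems l - fval w + fval v := by
  induction l with
  | nil => cases hmem
  | cons p t ih =>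
    simp only [List.map_cons, List.nodup_cons] at hn
    rcases List.mem_cons.mp hmem with h | h
    · subst h
      simp only [List.map_cons, beq_self_eq_true, if_pos]
      rw [map_replace_noop t k v hn.1]
      simp [cntItems]
      ring
    · have hpk : p.1 ≠ k := by
        intro hh
        exact hn.1 (hh ▸ List.mem_map.mpr ⟨(k, w), h, rfl⟩)
      have hb : (p.1 == k) = false := beq_false_of_ne hpk
      simp only [List.map_cons, hb, if_neg, Bool.false_eq_true, not_false_iff]
      have := ih hn.2 h
      simp [cntItems] at this ⊢
      omega

lemma cnt_insert (d : PySem.Dict Int (List Char)) (k : Int) (v : List Char)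
    (hn : d.keys.Nodup) :
    cntItems (d.insert k v).items = cntItems d.items - fval (d.getD k [' ']) + fval v := by
  cases hc : d.contains k with
  | false =>
    rw [PySem.Dict.items_insert_of_not_contains d v hc,
        PySem.Dict.getD_of_not_contains d [' '] hc]
    simp [cntItems, fval_space]
  | true =>
    obtain ⟨w, hw⟩ : ∃ w, d.get? k = some w := by
      have := PySem.Dict.contains_eq_isSome_get? d k
      rw [hc] at this
      exact Option.isSome_iff_exists.mp this.symm
    have hmem : (k, w) ∈ d.items := PySem.Dict.mem_items_of_get?_eq_some d hw
    have hgd : d.getD k [' '] = w := by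
      rw [PySem.Dict.getD_eq_get?_getD, hw]; rfl
    rw [PySem.Dict.items_insert_of_contains d v hc, hgd]
    exact sum_map_replace d.items k w v (by simpa [PySem.Dict.keys] using hn) hmem

-- B's update over the filtered line is A's skip-spaces fold
lemma update_filter (st : PySem.Set Char) (l : List Char) :
    PySem.Set.update st (l.filter (fun c => c != ' ')) = yesF l st := by
  induction l generalizing st with
  | nil => rfl
  | cons c t ih =>
    by_cases hc : c = ' '
    · subst hc; simpa [yesF] using ih st
    · have : (c != ' ') = true := by simpa using hc
      simp only [List.filter_cons, this, if_pos]
      have h1 : PySem.Set.update st (c :: List.filter (fun c => c != ' ') t)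
          = PySem.Set.update (PySem.Set.add st c) (List.filter (fun c => c != ' ') t) := rfl
      rw [h1, ih]
      simp [yesF, hc]

-- the main invariant: running A's remaining parse+count equals running B's fold from the
-- corresponding state (accumulated count of sealed groups, current group's set)
lemma main_inv (inputs : List String) (idx : Int) (d : PySem.Dict Int (List Char))
    (hk : ∀ k ∈ d.keys, k ≤ idx) (hn : d.keys.Nodup) :
    cntItems (parseLoop inputs idx d).items =
      (let st := inputs.foldl
        (fun (st : Int × PySem.Set Char) line =>
          if line = "" then (st.1 + PySem.Set.len st.2, PySem.Set.empty)
          else (st.1, PySem.Set.update st.2 (line.toList.filter (fun c => c != ' '))))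
        (cntItems d.items - fval (d.getD idx [' ']), yesF (d.getD idx [' ']) PySem.Set.empty)
      st.1 + PySem.Set.len st.2) := by
  induction inputs generalizing idx d with
  | nil =>
    simp only [parseLoop, List.foldl_nil, fval]
    omega
  | cons s rest ih =>
    by_cases hs : s = ""
    · subst hs
      simp only [parseLoop, List.foldl_cons, if_true]
      have hnc : d.contains (idx + 1) = false := by
        cases hcc : d.contains (idx + 1) with
        | false => rfl
        | true =>
          have := hk _ ((PySem.Dict.contains_iff_mem_keys d (idx + 1)).mp hcc)
          omega
      rw [ih (idx + 1) d (fun k hk' => le_trans (hk k hk') (by omega)) hn,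
          PySem.Dict.getD_of_not_contains d [' '] hnc]
      have hpair : ((cntItems d.items - fval [' '] : Int), yesF [' '] PySem.Set.empty)
          = ((cntItems d.items - fval (d.getD idx [' ']) + PySem.Set.len (yesF (d.getD idx [' ']) PySem.Set.empty) : Int), (PySem.Set.empty : PySem.Set Char)) := by
        have h1 : yesF [' '] PySem.Set.empty = (PySem.Set.empty : PySem.Set Char) := rfl
        have h2 : fval [' '] = 0 := fval_space
        rw [h2, h1]
        simp only [Prod.mk.injEq, fval]
        exact ⟨by omega, trivial⟩
      rw [hpair]
    · simp only [parseLoop, List.foldl_cons, if_neg hs]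
      have hk' : ∀ k ∈ (d.insert idx ((d.getD idx [' ']) ++ ' ' :: s.toList)).keys, k ≤ idx := by
        intro k hkmem
        rcases (PySem.Dict.mem_keys_insert d idx k _).mp hkmem with h | h
        · omega
        · exact hk k h
      rw [ih idx _ hk' (PySem.Dict.nodup_keys_insert d idx _ hn)]
      have hpair : ((cntItems (d.insert idx ((d.getD idx [' ']) ++ ' ' :: s.toList)).items
            - fval ((d.insert idx ((d.getD idx [' ']) ++ ' ' :: s.toList)).getD idx [' ']) : Int),
          yesF ((d.insert idx ((d.getD idx [' ']) ++ ' ' :: s.toList)).getD idx [' ']) PySem.Set.empty)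
          = ((cntItems d.items - fval (d.getD idx [' ']) : Int),
             PySem.Set.update (yesF (d.getD idx [' ']) PySem.Set.empty) (s.toList.filter (fun c => c != ' '))) := by
        rw [PySem.Dict.getD_insert_self, cnt_insert d idx _ hn, update_filter]
        simp only [Prod.mk.injEq]
        constructor
        · omega
        · rw [yesF_append, yesF_space_cons]
      rw [hpair]

-- ===== VERDICT (by name: the statement is the Claim_ definition above) =====
theorem part_1_spec : Claim_equal_part_1 := by
  intro inputs _
  show part_1 inputs = part_1_alt inputs
  unfold part_1 part_1_alt
  have hA : (parseLoop inputs 0 PySem.Dict.empty).items.foldl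
      (fun count p =>
        count + PySem.Set.len
          (p.2.foldl (fun yes c => if c = ' ' then yes else PySem.Set.add yes c) PySem.Set.empty))
      0 = cntItems (parseLoop inputs 0 PySem.Dict.empty).items := by
    rw [PySem.List.foldl_add]
    simp [cntItems, fval, yesF]
  rw [hA]
  have := main_inv inputs 0 PySem.Dict.empty (by simp [PySem.Dict.keys_empty]) PySem.Dict.nodup_keys_empty
  simpa [cntItems, fval_space] using this
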